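-- pv_equiv track=rewrite | github.com/Mtomas04/Pensamiento-computacional | Tp_1/tp1_funciones_Barreto.py | analizar_rachas
-- ===== SOURCE A (Python) =====
-- def analizar_rachas(simulacion):
--     '''
--     Analiza rachas en la lista `simulacion`.
--     Devuelve una tupla: (max_racha, clima_max_racha, rachas_de_4_o_mas)'''
--
--     racha_actual = 1
--     max_racha = 1
--     clima_max_racha = simulacion[0]
--     rachas_de_4_o_mas = 0
--
--     for i in range(1, len(simulacion)):
--         if simulacion[i] == simulacion[i - 1]:
--             racha_actual += 1
--         else:
--             if racha_actual > max_racha: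
--                 max_racha = racha_actual
--                 clima_max_racha = simulacion[i - 1]
--             if racha_actual >= 4:
--                 rachas_de_4_o_mas += 1
--             racha_actual = 1
--     if racha_actual > max_racha:
--         max_racha = racha_actual
--         clima_max_racha = simulacion[-1]
--     if racha_actual >= 4:
--         rachas_de_4_o_mas += 1
--
--     return max_racha, clima_max_racha, rachas_de_4_o_mas
-- ===== SOURCE B (Python) =====
-- def analizar_rachas(simulacion):
--     '''Two-phase rewrite: first materialize the list of runs as (value, length)
--     pairs, then aggregate (first-longest-run wins via strict >; count runs >= 4).'''
--     runs = []
--     i = 0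
--     n = len(simulacion)
--     while i < n:
--         j = i + 1
--         while j < n and simulacion[j] == simulacion[i]:
--             j += 1
--         runs.append((simulacion[i], j - i))
--         i = j
--     best_val, best_len = runs[0]            # IndexError on empty input, like A
--     for val, ln in runs[1:]:
--         if ln > best_len:
--             best_val, best_len = val, ln
--     rachas_de_4_o_mas = sum(1 for _, ln in runs if ln >= 4)
--     return best_len, best_val, rachas_de_4_o_mas
-- ===== Notes on version B (the rewrite author's own statement) =====
-- stated objective: idiomatic
-- what changed: B first materializes the list of runs as (value, length) pairs and then aggregates in a second pass (max with strict > for first-wins, count of lengths >= 4), instead of A's single index loop with carried streak state and a post-loop flush.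
import Mathlib
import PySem

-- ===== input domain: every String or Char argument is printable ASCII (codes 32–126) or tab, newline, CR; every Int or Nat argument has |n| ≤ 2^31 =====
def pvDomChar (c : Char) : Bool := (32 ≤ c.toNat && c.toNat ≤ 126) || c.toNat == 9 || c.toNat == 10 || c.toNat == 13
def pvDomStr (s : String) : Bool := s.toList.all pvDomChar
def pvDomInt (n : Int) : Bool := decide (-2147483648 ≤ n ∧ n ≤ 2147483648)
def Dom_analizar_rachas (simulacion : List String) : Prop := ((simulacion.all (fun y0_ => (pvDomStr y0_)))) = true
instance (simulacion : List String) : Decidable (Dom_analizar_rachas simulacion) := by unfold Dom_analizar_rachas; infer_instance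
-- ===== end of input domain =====

-- B materializes the list of runs as (value, length) pairs first, then aggregates in a
-- second pass; A carries streak state through one index loop. Same values on Pre_ (nonempty).

-- ===== PORT A =====
-- state: (racha_actual, max_racha, clima_max_racha, rachas_de_4_o_mas)
def analizar_rachas (simulacion : List String) : Int × String × Int :=
  let clima0 := PySem.List.pyGetD simulacion 0 ""      -- A raises IndexError on []; Pre_ excludes it
  let s :=
    (PySem.List.pyRange 1 (PySem.List.len simulacion) 1).foldl
      (fun (st : Int × Int × String × Int) i =>
        let (rac, maxr, clim, cnt) := st
        if PySem.List.pyGetD simulacion i "" == PySem.List.pyGetD simulacion (i - 1) "" then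
          (rac + 1, maxr, clim, cnt)
        else
          (1, (if rac > maxr then rac else maxr),
              (if rac > maxr then PySem.List.pyGetD simulacion (i - 1) "" else clim),
              (if rac ≥ 4 then cnt + 1 else cnt)))
      (1, 1, clima0, 0)
  let (rac, maxr, clim, cnt) := s
  ((if rac > maxr then rac else maxr),
   (if rac > maxr then PySem.List.pyGetD simulacion (-1) "" else clim),
   (if rac ≥ 4 then cnt + 1 else cnt))

-- ===== PORT B =====
-- phase 1 of Source B: the outer while builds runs; the inner while (j advancing while
-- equal) is the consecutive-equal prefix count, ported as takeWhile/drop.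
def pvRunsB : List String → List (String × Int)
  | [] => []
  | x :: rest =>
    let k := (rest.takeWhile (fun y => y == x)).length
    (x, (k : Int) + 1) :: pvRunsB (rest.drop k)
termination_by xs => xs.length
decreasing_by simp [List.length_drop]

def analizar_rachas_alt (simulacion : List String) : Int × String × Int :=
  let runs := pvRunsB simulacion
  let init := runs.headD ("", 0)                       -- Source B indexes runs[0]; raises on []
  let best := runs.tail.foldl (fun (b : String × Int) p => if p.2 > b.2 then p else b) init
  let cnt := runs.foldl (fun (acc : Int) p => if p.2 ≥ 4 then acc + 1 else acc) (0 : Int)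
  (best.2, best.1, cnt)

-- ===== PRECONDITION & SPEC =====
-- A (and B) raise IndexError on the empty list (simulacion[0] / runs[0]); excluded.
def Pre_analizar_rachas (simulacion : List String) : Prop := simulacion ≠ []
instance (simulacion : List String) : Decidable (Pre_analizar_rachas simulacion) := by
  unfold Pre_analizar_rachas; infer_instance
def pvWitness_analizar_rachas : List String := ["sol", "sol", "lluvia"]
def Spec_analizar_rachas (simulacion : List String) (out : Int × String × Int) : Prop := out = analizar_rachas_alt simulacion
instance (simulacion : List String) (out : Int × String × Int) : Decidable (Spec_analizar_rachas simulacion out) := by unfold Spec_analizar_rachas; infer_instance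

-- ===== CLAIM (what is proved, stated in full; the proofs are below) =====
def Claim_equal_analizar_rachas : Prop := ∀ (simulacion : List String), Dom_analizar_rachas simulacion → Pre_analizar_rachas simulacion → Spec_analizar_rachas simulacion (analizar_rachas simulacion)

-- ===== LEMMAS AND PROOFS =====

-- A's loop plus its post-loop flush, as a structural recursion carrying the previous element.
def pvLoopFin : String → List String → Int × Int × String × Int → Int × String × Int
  | prev, [], (rac, maxr, clim, cnt) =>
      ((if rac > maxr then rac else maxr),
       (if rac > maxr then prev else clim),
       (if rac ≥ 4 then cnt + 1 else cnt))
  | prev, x :: rest, (rac, maxr, clim, cnt) =>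
      if x == prev then pvLoopFin x rest (rac + 1, maxr, clim, cnt)
      else pvLoopFin x rest
        (1, (if rac > maxr then rac else maxr),
            (if rac > maxr then prev else clim),
            (if rac ≥ 4 then cnt + 1 else cnt))

theorem pvRunsB_nil : pvRunsB [] = [] := by rw [pvRunsB]
theorem pvRunsB_cons (x : String) (rest : List String) :
    pvRunsB (x :: rest) = (x, ((rest.takeWhile (fun y => y == x)).length : Int) + 1) ::
      pvRunsB (rest.drop (rest.takeWhile (fun y => y == x)).length) := by rw [pvRunsB]

-- merge a pending run (prev, rac) into a runs list whose head may share its value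
def pvMerge (prev : String) (rac : Int) : List (String × Int) → List (String × Int)
  | [] => [(prev, rac)]
  | (y, k) :: t => if y == prev then (prev, rac + k) :: t else (prev, rac) :: (y, k) :: t

-- aggregate a runs list the way A's finalization does, run by run
def pvStep : List (String × Int) → Int × String × Int → Int × String × Int
  | [], acc => acc
  | (v, k) :: t, (maxr, clim, cnt) =>
      pvStep t ((if k > maxr then k else maxr),
                (if k > maxr then v else clim),
                (if k ≥ 4 then cnt + 1 else cnt))

theorem pvMerge_runs (x : String) (rest : List String) (rac : Int) :
    pvMerge x (rac + 1) (pvRunsB rest) = pvMerge x rac (pvRunsB (x :: rest)) := by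
  cases rest with
  | nil => simp [pvRunsB_nil, pvRunsB_cons, pvMerge]
  | cons y t =>
    by_cases hxy : y = x
    · subst hxy
      rw [pvRunsB_cons, pvRunsB_cons]
      simp only [List.takeWhile, beq_self_eq_true, List.length_cons, List.drop_succ_cons,
        pvMerge, if_true]
      push_cast
      ring_nf
    · rw [pvRunsB_cons x (y :: t)]
      have hb : (y == x) = false := by simp [hxy]
      have htw : ((y :: t).takeWhile (fun z => z == x)).length = 0 := by
        simp [List.takeWhile, hb]
      simp only [htw, List.drop_zero, Nat.cast_zero, zero_add]
      rw [pvRunsB_cons y t]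
      simp [pvMerge, hxy]

theorem pvMerge_one (x : String) (rest : List String) :
    pvMerge x 1 (pvRunsB rest) = pvRunsB (x :: rest) := by
  have h := pvMerge_runs x rest 0
  rw [show (0 : Int) + 1 = 1 by ring] at h
  rw [h, pvRunsB_cons]
  simp [pvMerge]

theorem pvLoopFin_eq_step (rest : List String) : ∀ (prev : String) (rac maxr : Int)
    (clim : String) (cnt : Int),
    pvLoopFin prev rest (rac, maxr, clim, cnt) =
      pvStep (pvMerge prev rac (pvRunsB rest)) (maxr, clim, cnt) := by
  induction rest with
  | nil => intro prev rac maxr clim cnt; simp [pvLoopFin, pvRunsB_nil, pvMerge, pvStep]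
  | cons x rest ih =>
    intro prev rac maxr clim cnt
    rw [pvLoopFin]
    by_cases hxp : x = prev
    · subst hxp
      simp only [beq_self_eq_true, if_true]
      rw [ih, pvMerge_runs]
    · have hb : (x == prev) = false := by simp [hxp]
      simp only [hb, Bool.false_eq_true, if_false]
      rw [ih, pvMerge_one]
      have hner : pvMerge prev rac (pvRunsB (x :: rest)) =
          (prev, rac) :: pvRunsB (x :: rest) := by
        rw [pvRunsB_cons]
        simp [pvMerge, hxp]
      rw [hner, pvStep]

-- pvStep decomposes into B's two independent folds
theorem pvStep_decomp (rs : List (String × Int)) : ∀ (m : Int) (c : String) (n : Int),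
    pvStep rs (m, c, n) =
      ((rs.foldl (fun (b : String × Int) p => if p.2 > b.2 then p else b) (c, m)).2,
       (rs.foldl (fun (b : String × Int) p => if p.2 > b.2 then p else b) (c, m)).1,
       rs.foldl (fun (acc : Int) p => if p.2 ≥ 4 then acc + 1 else acc) n) := by
  induction rs with
  | nil => intro m c n; simp [pvStep]
  | cons p t ih =>
    intro m c n
    obtain ⟨v, k⟩ := p
    rw [pvStep, ih]
    simp only [List.foldl_cons]
    by_cases hk : k > m
    · simp [hk]
    · simp [hk]

-- A's index fold (with the flush) equals pvLoopFin carried from position i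
theorem pvFoldA_eq (xs : List String) (hne : xs ≠ []) :
    ∀ (d : List String) (i : Nat), xs.drop i = d → 1 ≤ i → i ≤ xs.length →
    ∀ (s : Int × Int × String × Int),
    (let s' :=
      (PySem.List.pyRange (i : Int) (PySem.List.len xs) 1).foldl
        (fun (st : Int × Int × String × Int) j =>
          let (rac, maxr, clim, cnt) := st
          if PySem.List.pyGetD xs j "" == PySem.List.pyGetD xs (j - 1) "" then
            (rac + 1, maxr, clim, cnt)
          else
            (1, (if rac > maxr then rac else maxr),
                (if rac > maxr then PySem.List.pyGetD xs (j - 1) "" else clim),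
                (if rac ≥ 4 then cnt + 1 else cnt))) s
     let (rac, maxr, clim, cnt) := s'
     (((if rac > maxr then rac else maxr) : Int),
      (if rac > maxr then PySem.List.pyGetD xs (-1) "" else clim),
      (if rac ≥ 4 then cnt + 1 else cnt))) =
    pvLoopFin (xs.getD (i - 1) "") d s := by
  intro d
  induction d with
  | nil =>
    intro i hdrop h1 hlen s
    have hge : xs.length ≤ i := by
      by_contra h
      have := List.drop_eq_nil_iff.mp hdrop
      omega
    have hi : i = xs.length := by omega
    have hnil : PySem.List.pyRange (i : Int) (PySem.List.len xs) 1 = [] := by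
      apply PySem.List.pyRange_one_eq_nil
      simp [hi]
    rw [hnil]
    obtain ⟨rac, maxr, clim, cnt⟩ := s
    simp only [List.foldl_nil, pvLoopFin]
    have hlast : PySem.List.pyGetD xs (-1) "" = xs.getD (i - 1) "" := by
      rw [PySem.List.pyGetD_neg_one xs "" hne]
      rw [List.getLast_eq_getElem]
      rw [List.getD_eq_getElem]
      · congr 1; omega
      · omega
    rw [hlast]
  | cons y ys ih =>
    intro i hdrop h1 hlen s
    have hlt : i < xs.length := by
      by_contra h
      rw [List.drop_eq_nil_iff.mpr (by omega)] at hdrop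
      simp at hdrop
    have hcons : PySem.List.pyRange (i : Int) (PySem.List.len xs) 1 =
        (i : Int) :: PySem.List.pyRange ((i : Int) + 1) (PySem.List.len xs) 1 := by
      apply PySem.List.pyRange_one_cons
      simp; exact_mod_cast hlt
    rw [hcons]
    obtain ⟨rac, maxr, clim, cnt⟩ := s
    have hy : PySem.List.pyGetD xs (i : Int) "" = y := by
      rw [PySem.List.pyGetD_natCast]
      rw [List.getD_eq_getElem xs "" hlt]
      have h0 : (xs.drop i)[0]'(by simp [hdrop]) = y := by simp [hdrop]
      rw [List.getElem_drop] at h0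
      simpa using h0
    have hprev : PySem.List.pyGetD xs ((i : Int) - 1) "" = xs.getD (i - 1) "" := by
      have : ((i : Int) - 1) = ((i - 1 : Nat) : Int) := by omega
      rw [this, PySem.List.pyGetD_natCast]
    have hdrop' : xs.drop (i + 1) = ys := by
      have h2 : (xs.drop i).drop 1 = ys := by rw [hdrop]; rfl
      rwa [List.drop_drop] at h2
    have hyy : xs.getD i "" = y := by rw [← PySem.List.pyGetD_natCast]; exact hy
    have hih := ih (i + 1) hdrop' (by omega) (by omega)
    simp only [Nat.cast_add, Nat.cast_one, Nat.add_sub_cancel, hyy] at hih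
    simp only [List.foldl_cons, hy, hprev, pvLoopFin]
    by_cases hyp : y = xs.getD (i - 1) ""
    · simp only [hyp, beq_self_eq_true, if_true]
      have h2 := hih (rac + 1, maxr, clim, cnt)
      rw [hyp] at h2
      exact h2
    · have hb : (y == xs.getD (i - 1) "") = false := by rw [beq_eq_false_iff_ne]; exact hyp
      simp only [hb, Bool.false_eq_true, if_false]
      exact hih (1, (if rac > maxr then rac else maxr),
        (if rac > maxr then xs.getD (i - 1) "" else clim),
        (if rac ≥ 4 then cnt + 1 else cnt))

-- ===== VERDICT (by name: the statement is the Claim_ definition above) =====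
theorem analizar_rachas_spec : Claim_equal_analizar_rachas := by
  intro xs _ hpre
  unfold Spec_analizar_rachas
  obtain ⟨x, rest, rfl⟩ := List.exists_cons_of_ne_nil hpre
  have hA := pvFoldA_eq (x :: rest) hpre rest 1 (by simp) (by omega) (by simp) (1, 1, x, 0)
  simp only [Nat.cast_one, Nat.sub_self, List.getD] at hA
  have hA' : analizar_rachas (x :: rest) = pvLoopFin x rest (1, 1, x, 0) := by
    unfold analizar_rachas
    have h0 : PySem.List.pyGetD (x :: rest) 0 "" = x := PySem.List.pyGetD_zero_cons x rest ""
    rw [h0]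
    convert hA using 2
  rw [hA', pvLoopFin_eq_step, pvMerge_one, pvStep_decomp]
  unfold analizar_rachas_alt
  rw [pvRunsB_cons]
  simp only [List.headD_cons, List.tail_cons, List.foldl_cons]
  set k := ((rest.takeWhile (fun y => y == x)).length : Int) with hk
  have hk0 : 0 ≤ k := by positivity
  have hinit : (if k + 1 > 1 then (x, k + 1) else (x, (1 : Int))) = (x, k + 1) := by
    by_cases h : k + 1 > 1
    · simp [h]
    · have : k = 0 := by omega
      simp [this]
  simp only [hinit]
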